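-- pv_equiv track=rewrite | github.com/tolgafurat/Kilit-Oyunu | proje2.py | TabloDoldur
-- ===== SOURCE A (Python) =====
-- def TabloDoldur(liste, boyut, tasSayisi, oyuncu1, oyuncu2):
--     satir1, sutun1, satir2, sutun2, yerlestirilen = boyut - 1, 0, 0, 0, 0
--     while True:
--       liste[satir1][sutun1] = oyuncu1
--       liste[satir2][sutun2] = oyuncu2
--       yerlestirilen += 1
--       sutun1 += 1
--       sutun2 += 1
--       if yerlestirilen == tasSayisi:
--         break
--       elif sutun1 == boyut:
--         sutun1, sutun2 = 0, 0
--         satir1 -= 1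
--         satir2 += 1
--     return liste
-- ===== SOURCE B (Python) =====
-- def TabloDoldur(liste, boyut, tasSayisi, oyuncu1, oyuncu2):
--     dolu, kalan = divmod(tasSayisi, boyut)
--     satir = 0
--     while satir != dolu:                          # the full rows
--         liste[boyut - 1 - satir][:boyut] = [oyuncu1] * boyut
--         liste[satir][:boyut] = [oyuncu2] * boyut
--         satir += 1
--     if kalan > 0:                                 # the partial row
--         liste[boyut - 1 - satir][:kalan] = [oyuncu1] * kalan
--         liste[satir][:kalan] = [oyuncu2] * kalan
--     return liste
-- ===== Notes on version B (the rewrite author's own statement) =====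
-- stated objective: alternative
-- what changed: Replaces the per-piece while-True state machine (four counters, column-reset branch, two single-cell writes per piece) by a row-wise bulk fill: divmod(tasSayisi, boyut) splits the count into full rows and a remainder, a while loop writes each full row in one slice assignment per player, then the partial row; correct because within a row-block A's per-cell writes touch pairwise distinct cells except that player2 always follows player1, so the last-write-wins outcome is the same.
-- outside the precondition, e.g. on TabloDoldur([['a'], ['b']], 0, 1, 'X', 'O'): A returns [['O'], ['X']], B raises ZeroDivisionError; on TabloDoldur([['a'], ['b']], -1, 1, 'X', 'O'): A returns [['O'], ['b']], B raises IndexError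
import Mathlib
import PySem

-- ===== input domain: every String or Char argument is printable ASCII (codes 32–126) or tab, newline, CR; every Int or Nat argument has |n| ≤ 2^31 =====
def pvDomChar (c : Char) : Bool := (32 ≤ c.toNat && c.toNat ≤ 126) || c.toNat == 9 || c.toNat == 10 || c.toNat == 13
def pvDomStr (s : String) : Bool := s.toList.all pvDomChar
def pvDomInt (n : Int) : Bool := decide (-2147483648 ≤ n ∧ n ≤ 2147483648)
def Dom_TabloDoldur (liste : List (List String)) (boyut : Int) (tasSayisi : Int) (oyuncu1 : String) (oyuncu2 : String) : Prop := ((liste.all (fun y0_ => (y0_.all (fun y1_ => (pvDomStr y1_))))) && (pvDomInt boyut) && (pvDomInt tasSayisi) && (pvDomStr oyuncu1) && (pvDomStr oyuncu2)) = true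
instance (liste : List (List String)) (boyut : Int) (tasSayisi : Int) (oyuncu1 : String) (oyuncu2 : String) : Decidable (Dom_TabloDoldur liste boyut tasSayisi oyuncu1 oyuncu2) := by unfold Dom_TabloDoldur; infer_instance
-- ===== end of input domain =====

-- B replaces the per-piece while-True state machine (four counters, column-reset branch,
-- two single-cell writes per piece) by a row-wise bulk fill: divmod splits the count into
-- full rows and a remainder, each row written by one slice assignment per player —
-- objective: alternative decomposition, same cost. Both Pythons mutate `liste` in place;
-- the equivalence proved here is about the returned value (inside Pre_ both mutate the
-- grid identically).

-- Python's `liste[i][j] = v` (negative index wraps; an out-of-range write is an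
-- IndexError in Python, excluded by Pre_; the port leaves the list unchanged there).
def pySetCell (L : List (List String)) (i j : Int) (v : String) : List (List String) :=
  let i' : Int := if i < 0 then i + L.length else i
  if 0 ≤ i' ∧ i' < L.length then
    let row := L.getD i'.toNat []
    let j' : Int := if j < 0 then j + row.length else j
    if 0 ≤ j' ∧ j' < row.length then L.set i'.toNat (row.set j'.toNat v) else L
  else L

-- ===== PORT A =====
-- the while-True loop; fuel makes it total (the Python loop breaks after exactly
-- tasSayisi iterations whenever tasSayisi ≥ 1, which Pre_ guarantees)
def TabloDoldurLoop (boyut tasSayisi : Int) (oyuncu1 oyuncu2 : String) :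
    Nat → List (List String) → Int → Int → Int → Int → Int → List (List String)
  | 0, liste, _, _, _, _, _ => liste
  | fuel + 1, liste, satir1, sutun1, satir2, sutun2, yerlestirilen =>
    let liste := pySetCell liste satir1 sutun1 oyuncu1
    let liste := pySetCell liste satir2 sutun2 oyuncu2
    let yerlestirilen := yerlestirilen + 1
    let sutun1 := sutun1 + 1
    let sutun2 := sutun2 + 1
    if yerlestirilen = tasSayisi then liste
    else if sutun1 = boyut then
      TabloDoldurLoop boyut tasSayisi oyuncu1 oyuncu2 fuel liste (satir1 - 1) 0 (satir2 + 1) 0 yerlestirilen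
    else
      TabloDoldurLoop boyut tasSayisi oyuncu1 oyuncu2 fuel liste satir1 sutun1 satir2 sutun2 yerlestirilen

def TabloDoldur (liste : List (List String)) (boyut : Int) (tasSayisi : Int) (oyuncu1 : String) (oyuncu2 : String) : List (List String) :=
  TabloDoldurLoop boyut tasSayisi oyuncu1 oyuncu2 tasSayisi.toNat liste (boyut - 1) 0 0 0 0

-- ===== PORT B =====
-- Python's `liste[i][:m] = [v]*m` (negative index wraps; a missing row is an IndexError
-- in Python, excluded by Pre_; the port leaves the list unchanged there). The slice
-- assignment replaces row[:m] (stop clamped Python-style, so a negative m keeps the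
-- tail row[len+m:] and a too-large m extends the row) by max(m,0) copies of v — exact.
def pySliceFill (L : List (List String)) (i m : Int) (v : String) : List (List String) :=
  let i' : Int := if i < 0 then i + L.length else i
  if 0 ≤ i' ∧ i' < L.length then
    let row := L.getD i'.toNat []
    let stop : Int := if m < 0 then m + row.length else m
    L.set i'.toNat (List.replicate m.toNat v ++ row.drop stop.toNat)
  else L

-- B's while loop over the full rows; fuel makes it total (with dolu ≥ 0, which Pre_
-- guarantees, the loop runs exactly dolu iterations; where Python raises instead the
-- port's value is unclaimed)
def TabloDoldurAltLoop (boyut dolu : Int) (oyuncu1 oyuncu2 : String) :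
    Nat → List (List String) → Int → List (List String)
  | 0, liste, _ => liste
  | fuel + 1, liste, satir =>
    if satir = dolu then liste
    else
      TabloDoldurAltLoop boyut dolu oyuncu1 oyuncu2 fuel
        (pySliceFill (pySliceFill liste (boyut - 1 - satir) boyut oyuncu1) satir boyut oyuncu2)
        (satir + 1)

def TabloDoldur_alt (liste : List (List String)) (boyut : Int) (tasSayisi : Int) (oyuncu1 : String) (oyuncu2 : String) : List (List String) :=
  let dolu := PySem.Int.floordiv tasSayisi boyut
  let kalan := PySem.Int.mod tasSayisi boyut
  let liste := TabloDoldurAltLoop boyut dolu oyuncu1 oyuncu2 (dolu.toNat + 1) liste 0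
  if 0 < kalan then
    pySliceFill (pySliceFill liste (boyut - 1 - dolu) kalan oyuncu1) dolu kalan oyuncu2
  else liste

-- ===== PRECONDITION & SPEC =====
-- length of the row Python's liste[i] selects (negative i wraps)
def pvRowLen (liste : List (List String)) (i : Int) : Nat :=
  (liste.getD (if i < 0 then i + liste.length else i).toNat []).length

-- Python's `liste[i][j] = v` succeeds (both indices in range after negative wrap)
def pvCellOk (liste : List (List String)) (i j : Int) : Bool :=
  decide (-(liste.length : Int) ≤ i) && decide (i < liste.length) &&
  decide (-(pvRowLen liste i : Int) ≤ j) && decide (j < pvRowLen liste i)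

-- Pre_ = boyut ≥ 1, tasSayisi ≥ 1 and every cell A's loop writes exists — exactly where
-- neither program raises. Writes never change lengths, so checking the input grid is
-- exact; the size bound is implied by the per-write checks (the written player-2 cells
-- are tasSayisi distinct valid cells) and only lets the check answer False before
-- enumerating a huge range. Excluded although A returns there (see claim cites): the
-- never-used regime boyut ≤ 0, where B raises (ZeroDivisionError at boyut = 0; for
-- boyut ≤ -1 its full-row loop runs past every row and hits an IndexError).
def Pre_TabloDoldur (liste : List (List String)) (boyut : Int) (tasSayisi : Int) (oyuncu1 : String) (oyuncu2 : String) : Prop :=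
  (decide (1 ≤ boyut) && decide (1 ≤ tasSayisi) &&
   decide (tasSayisi ≤ (liste.length : Int) * ((liste.map List.length).foldl max 0 : Nat)) &&
   ((PySem.List.pyRange 0 tasSayisi 1).all fun j =>
     pvCellOk liste (boyut - 1 - j / boyut) (j % boyut) && pvCellOk liste (j / boyut) (j % boyut))) = true
instance (liste : List (List String)) (boyut : Int) (tasSayisi : Int) (oyuncu1 : String) (oyuncu2 : String) : Decidable (Pre_TabloDoldur liste boyut tasSayisi oyuncu1 oyuncu2) := by unfold Pre_TabloDoldur; infer_instance

def pvWitness_TabloDoldur : List (List String) × Int × Int × String × String :=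
  ([[".", "."], [".", "."]], 2, 3, "X", "O")

def Spec_TabloDoldur (liste : List (List String)) (boyut : Int) (tasSayisi : Int) (oyuncu1 : String) (oyuncu2 : String) (out : List (List String)) : Prop := out = TabloDoldur_alt liste boyut tasSayisi oyuncu1 oyuncu2
instance (liste : List (List String)) (boyut : Int) (tasSayisi : Int) (oyuncu1 : String) (oyuncu2 : String) (out : List (List String)) : Decidable (Spec_TabloDoldur liste boyut tasSayisi oyuncu1 oyuncu2 out) := by unfold Spec_TabloDoldur; infer_instance

-- ===== CLAIM (what is proved, stated in full; the proofs are below) =====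
def Claim_equal_TabloDoldur : Prop := ∀ (liste : List (List String)) (boyut : Int) (tasSayisi : Int) (oyuncu1 : String) (oyuncu2 : String), Dom_TabloDoldur liste boyut tasSayisi oyuncu1 oyuncu2 → Pre_TabloDoldur liste boyut tasSayisi oyuncu1 oyuncu2 → Spec_TabloDoldur liste boyut tasSayisi oyuncu1 oyuncu2 (TabloDoldur liste boyut tasSayisi oyuncu1 oyuncu2)

-- ===== LEMMAS AND PROOFS =====

-- ---- layer 0: pvWrite, a normal form of pySetCell for a nonnegative column ----
-- effective index of Python's possibly-negative list index
def pvEff (n : Nat) (i : Int) : Int := if i < 0 then i + n else i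

def pvWrite (L : List (List String)) (i : Int) (j : Nat) (v : String) : List (List String) :=
  if 0 ≤ pvEff L.length i ∧ pvEff L.length i < L.length then
    L.set (pvEff L.length i).toNat ((L.getD (pvEff L.length i).toNat []).set j v)
  else L

lemma pySetCell_nonneg (L : List (List String)) (i j : Int) (v : String) (hj : 0 ≤ j) :
    pySetCell L i j v = pvWrite L i j.toNat v := by
  unfold pySetCell pvWrite pvEff
  simp only [if_neg (show ¬ j < 0 by omega)]
  by_cases hi : i < 0
  · simp only [if_pos hi]
    split_ifs with h2 h3
    · rfl
    · have he : (i + (L.length:Int)).toNat < L.length := by omega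
      have hrow : (L.getD (i + (L.length:Int)).toNat []).length ≤ j.toNat := by omega
      rw [List.set_eq_of_length_le hrow, List.getD_eq_getElem L _ he, List.set_getElem_self]
    · rfl
  · simp only [if_neg hi]
    split_ifs with h2 h3
    · rfl
    · have he : i.toNat < L.length := by omega
      have hrow : (L.getD i.toNat []).length ≤ j.toNat := by omega
      rw [List.set_eq_of_length_le hrow, List.getD_eq_getElem L _ he, List.set_getElem_self]
    · rfl

lemma length_pvWrite (L : List (List String)) (i : Int) (j : Nat) (v : String) :
    (pvWrite L i j v).length = L.length := by
  unfold pvWrite; split_ifs <;> simp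

lemma pvWrite_pos (L : List (List String)) (i : Int) (j : Nat) (v : String)
    (h : 0 ≤ pvEff L.length i ∧ pvEff L.length i < L.length) :
    pvWrite L i j v = L.set (pvEff L.length i).toNat ((L.getD (pvEff L.length i).toNat []).set j v) := by
  unfold pvWrite; rw [if_pos h]

lemma pvWrite_neg (L : List (List String)) (i : Int) (j : Nat) (v : String)
    (h : ¬ (0 ≤ pvEff L.length i ∧ pvEff L.length i < L.length)) :
    pvWrite L i j v = L := by
  unfold pvWrite; rw [if_neg h]

lemma pvEff_lt (n : Nat) (i : Int) (h : 0 ≤ pvEff n i ∧ pvEff n i < n) : (pvEff n i).toNat < n := by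
  omega

lemma getD_set_ne' (l : List (List String)) (a b : Nat) (x : List String) (h : a ≠ b) :
    (l.set a x).getD b [] = l.getD b [] := by
  simp [List.getD, List.getElem?_set_ne h]

lemma getD_set_self' (l : List (List String)) (a : Nat) (x : List String) (h : a < l.length) :
    (l.set a x).getD a [] = x := by
  simp [List.getD, h]

-- row lengths are preserved too: pvWrite preserves the whole shape
lemma shape_pvWrite (L : List (List String)) (i : Int) (j : Nat) (v : String) :
    (pvWrite L i j v).map List.length = L.map List.length := by
  unfold pvWrite
  split_ifs with h
  · have he : (pvEff L.length i).toNat < L.length := pvEff_lt _ _ h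
    rw [List.map_set, List.length_set, List.getD_eq_getElem L _ he]
    have hmap : L[(pvEff L.length i).toNat].length
        = (L.map List.length)[(pvEff L.length i).toNat]'(by simpa using he) := by simp
    rw [hmap, List.set_getElem_self]
  · rfl

-- ---- layer 1: writes to distinct columns commute ----
lemma pvWrite_comm (L : List (List String)) (i1 i2 : Int) (j1 j2 : Nat) (v1 v2 : String)
    (hne : j1 ≠ j2) :
    pvWrite (pvWrite L i1 j1 v1) i2 j2 v2 = pvWrite (pvWrite L i2 j2 v2) i1 j1 v1 := by
  by_cases c1 : 0 ≤ pvEff L.length i1 ∧ pvEff L.length i1 < L.length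
  · by_cases c2 : 0 ≤ pvEff L.length i2 ∧ pvEff L.length i2 < L.length
    · have he1 := pvEff_lt _ _ c1
      have he2 := pvEff_lt _ _ c2
      have c1' : 0 ≤ pvEff (pvWrite L i2 j2 v2).length i1 ∧
          pvEff (pvWrite L i2 j2 v2).length i1 < (pvWrite L i2 j2 v2).length := by
        rw [length_pvWrite]; exact c1
      have c2' : 0 ≤ pvEff (pvWrite L i1 j1 v1).length i2 ∧
          pvEff (pvWrite L i1 j1 v1).length i2 < (pvWrite L i1 j1 v1).length := by
        rw [length_pvWrite]; exact c2
      rw [pvWrite_pos _ _ _ _ c2', pvWrite_pos _ _ _ _ c1', pvWrite_pos _ _ _ _ c1,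
          pvWrite_pos _ _ _ _ c2]
      simp only [List.length_set]
      by_cases heq : (pvEff L.length i1).toNat = (pvEff L.length i2).toNat
      · rw [← heq]
        rw [getD_set_self' _ _ _ he1, getD_set_self' _ _ _ (heq ▸ he2),
            List.set_set, List.set_set, List.set_comm _ _ hne]
      · rw [getD_set_ne' _ _ _ _ heq, getD_set_ne' _ _ _ _ (Ne.symm heq),
            List.set_comm _ _ heq]
    · have c2' : ¬ (0 ≤ pvEff (pvWrite L i1 j1 v1).length i2 ∧
          pvEff (pvWrite L i1 j1 v1).length i2 < (pvWrite L i1 j1 v1).length) := by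
        rw [length_pvWrite]; exact c2
      rw [pvWrite_neg _ _ _ _ c2', pvWrite_neg _ _ _ _ c2]
  · have c1' : ¬ (0 ≤ pvEff (pvWrite L i2 j2 v2).length i1 ∧
        pvEff (pvWrite L i2 j2 v2).length i1 < (pvWrite L i2 j2 v2).length) := by
      rw [length_pvWrite]; exact c1
    rw [pvWrite_neg _ _ _ _ c1', pvWrite_neg _ _ _ _ c1]

-- a write to column c commutes past a whole phase of writes to other columns
lemma pvWrite_foldl_comm (i1 i2 : Int) (v1 v2 : String) (c : Nat) :
    ∀ (cs : List Nat) (L : List (List String)), (∀ x ∈ cs, x ≠ c) →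
      cs.foldl (fun M x => pvWrite M i2 x v2) (pvWrite L i1 c v1)
        = pvWrite (cs.foldl (fun M x => pvWrite M i2 x v2) L) i1 c v1 := by
  intro cs
  induction cs with
  | nil => intro L _; rfl
  | cons x xs ih =>
    intro L h
    simp only [List.foldl_cons]
    rw [pvWrite_comm L i1 i2 c x v1 v2 (Ne.symm (h x (by simp)))]
    exact ih _ (fun y hy => h y (by simp [hy]))

-- interleaved per-column pairs = player-1 phase then player-2 phase
lemma interleave_eq (i1 i2 : Int) (v1 v2 : String) :
    ∀ (M : Nat) (L : List (List String)),
      (List.range M).foldl (fun N c => pvWrite (pvWrite N i1 c v1) i2 c v2) L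
        = (List.range M).foldl (fun N c => pvWrite N i2 c v2)
            ((List.range M).foldl (fun N c => pvWrite N i1 c v1) L) := by
  intro M
  induction M with
  | zero => intro L; rfl
  | succ M ih =>
    intro L
    rw [List.range_succ]
    simp only [List.foldl_append, List.foldl_cons, List.foldl_nil]
    rw [ih, ← pvWrite_foldl_comm i1 i2 v1 v2 M (List.range M)
          ((List.range M).foldl (fun N c => pvWrite N i1 c v1) L)
          (fun x hx => by have := List.mem_range.mp hx; omega)]

-- one phase of single-cell writes to columns 0..M-1 of one row = one slice assignment
lemma phase_fold (i : Int) (v : String) (L : List (List String))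
    (he : 0 ≤ pvEff L.length i ∧ pvEff L.length i < L.length) :
    ∀ (M : Nat), M ≤ (L.getD (pvEff L.length i).toNat []).length →
      (List.range M).foldl (fun N c => pvWrite N i c v) L
        = L.set (pvEff L.length i).toNat
            (List.replicate M v ++ (L.getD (pvEff L.length i).toNat []).drop M) := by
  intro M
  induction M with
  | zero =>
    intro _
    rw [List.replicate_zero, List.nil_append, List.drop_zero,
        List.getD_eq_getElem L _ (pvEff_lt _ _ he), List.set_getElem_self]
    rfl
  | succ M ih =>
    intro hM
    rw [List.range_succ]
    simp only [List.foldl_append, List.foldl_cons, List.foldl_nil]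
    rw [ih (by omega)]
    have hlen : (L.set (pvEff L.length i).toNat
        (List.replicate M v ++ (L.getD (pvEff L.length i).toNat []).drop M)).length = L.length :=
      List.length_set ..
    have he' : 0 ≤ pvEff (L.set (pvEff L.length i).toNat
          (List.replicate M v ++ (L.getD (pvEff L.length i).toNat []).drop M)).length i ∧
        pvEff (L.set (pvEff L.length i).toNat
          (List.replicate M v ++ (L.getD (pvEff L.length i).toNat []).drop M)).length i <
        (L.set (pvEff L.length i).toNat
          (List.replicate M v ++ (L.getD (pvEff L.length i).toNat []).drop M)).length := by
      rw [hlen]; exact he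
    rw [pvWrite_pos _ _ _ _ he']
    simp only [hlen]
    rw [getD_set_self' _ _ _ (pvEff_lt _ _ he), List.set_set]
    congr 1
    rw [List.set_append_right _ _ (by simp), List.length_replicate, Nat.sub_self,
        List.drop_eq_getElem_cons (by omega : M < (L.getD (pvEff L.length i).toNat []).length),
        List.set_cons_zero, List.replicate_succ' .., List.append_assoc, List.singleton_append]

-- the branch pySliceFill takes under a valid row index and a nonnegative width
lemma pySliceFill_pos (L : List (List String)) (i m : Int) (v : String)
    (h : 0 ≤ pvEff L.length i ∧ pvEff L.length i < L.length) (hm : 0 ≤ m) :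
    pySliceFill L i m v = L.set (pvEff L.length i).toNat
      (List.replicate m.toNat v ++ (L.getD (pvEff L.length i).toNat []).drop m.toNat) := by
  unfold pySliceFill pvEff
  unfold pvEff at h
  rw [if_pos h]
  simp only [if_neg (show ¬ m < 0 by omega)]

-- the per-piece step of A, as it acts on the list state (columns are j % b, rows j // b)
def pvPerCell (b : Int) (v1 v2 : String) (L : List (List String)) (j : Int) : List (List String) :=
  pySetCell (pySetCell L (b - 1 - PySem.Int.floordiv j b) (PySem.Int.mod j b) v1)
    (PySem.Int.floordiv j b) (PySem.Int.mod j b) v2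

-- divmod of a piece index inside block k
lemma blockDivMod (b k c : Int) (hb : 0 < b) (hc0 : 0 ≤ c) (hcb : c < b) :
    (k*b + c) / b = k ∧ (k*b + c) % b = c := by
  constructor
  · rw [mul_comm k b, add_comm, Int.add_mul_ediv_left _ _ (by omega : b ≠ 0),
        Int.ediv_eq_zero_of_lt hc0 hcb, zero_add]
  · rw [mul_comm k b, add_comm, Int.add_mul_emod_self_left, Int.emod_eq_of_lt hc0 hcb]

-- one block of b consecutive pieces re-indexed to per-column pair writes
lemma block_reindex (b : Int) (hb : 0 < b) (v1 v2 : String) (k m : Int)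
    (hk : 0 ≤ k) (hm : 0 ≤ m) (hmb : m ≤ b) (L : List (List String)) :
    (PySem.List.pyRange (k*b) (k*b+m) 1).foldl (pvPerCell b v1 v2) L
      = (List.range m.toNat).foldl (fun N c => pvWrite (pvWrite N (b-1-k) c v1) k c v2) L := by
  rw [PySem.List.pyRange_one]
  have harg : (k*b+m - k*b) = m := by ring
  rw [harg]
  rw [List.foldl_map]
  apply PySem.List.foldl_congr_mem
  intro N c hc
  have hc' : (c : Int) < m := by
    have := List.mem_range.mp hc; omega
  have hc0 : (0:Int) ≤ (c:Int) := by positivity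
  obtain ⟨hdiv, hmod⟩ := blockDivMod b k (c:Int) hb hc0 (by omega)
  unfold pvPerCell
  rw [PySem.Int.floordiv_eq_ediv_of_pos hb, PySem.Int.mod_eq_emod_of_pos hb, hdiv, hmod]
  rw [pySetCell_nonneg _ _ _ _ hc0, pySetCell_nonneg _ _ _ _ hc0, Int.toNat_natCast]

-- ---- shape transport: every condition blockEq needs depends only on the shape ----
lemma shape_length (L M : List (List String)) (h : L.map List.length = M.map List.length) :
    L.length = M.length := by
  simpa using congrArg List.length h

lemma shape_rowlen (L M : List (List String)) (h : L.map List.length = M.map List.length)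
    (e : Nat) : (L.getD e []).length = (M.getD e []).length := by
  have hX : ∀ (X : List (List String)), (X.getD e []).length = (X.map List.length).getD e 0 := by
    intro X
    cases hx : X[e]? with
    | none => simp [List.getD, hx]
    | some r => simp [List.getD, hx]
  rw [hX L, hX M, h]

lemma shape_pvPerCell (b : Int) (hb : 0 < b) (v1 v2 : String) (L : List (List String)) (j : Int) :
    (pvPerCell b v1 v2 L j).map List.length = L.map List.length := by
  unfold pvPerCell
  rw [pySetCell_nonneg _ _ _ _ (PySem.Int.mod_nonneg j hb),
      pySetCell_nonneg _ _ _ _ (PySem.Int.mod_nonneg j hb),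
      shape_pvWrite, shape_pvWrite]

lemma shape_foldl_pvPerCell (b : Int) (hb : 0 < b) (v1 v2 : String) :
    ∀ (js : List Int) (L : List (List String)),
      (js.foldl (pvPerCell b v1 v2) L).map List.length = L.map List.length := by
  intro js
  induction js with
  | nil => intro L; rfl
  | cons j js ih => intro L; rw [List.foldl_cons, ih, shape_pvPerCell b hb]

-- ---- one block of ≤ b consecutive pieces = B's two slice assignments ----
lemma blockEq (b : Int) (hb : 0 < b) (v1 v2 : String) (k m : Int)
    (hk : 0 ≤ k) (hm : 0 ≤ m) (hmb : m ≤ b) (L : List (List String))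
    (h1 : 0 ≤ pvEff L.length (b-1-k) ∧ pvEff L.length (b-1-k) < L.length)
    (h2 : 0 ≤ pvEff L.length k ∧ pvEff L.length k < L.length)
    (hr1 : m.toNat ≤ (L.getD (pvEff L.length (b-1-k)).toNat []).length)
    (hr2 : m.toNat ≤ (L.getD (pvEff L.length k).toNat []).length) :
    (PySem.List.pyRange (k*b) (k*b+m) 1).foldl (pvPerCell b v1 v2) L
      = pySliceFill (pySliceFill L (b-1-k) m v1) k m v2 := by
  rw [block_reindex b hb v1 v2 k m hk hm hmb L, interleave_eq,
      phase_fold _ _ _ h1 _ hr1, pySliceFill_pos L _ _ _ h1 hm]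
  have hlen1 : (L.set (pvEff L.length (b-1-k)).toNat
      (List.replicate m.toNat v1 ++ (L.getD (pvEff L.length (b-1-k)).toNat []).drop m.toNat)).length
      = L.length := List.length_set ..
  have h2' : 0 ≤ pvEff (L.set (pvEff L.length (b-1-k)).toNat
        (List.replicate m.toNat v1 ++ (L.getD (pvEff L.length (b-1-k)).toNat []).drop m.toNat)).length k ∧
      pvEff (L.set (pvEff L.length (b-1-k)).toNat
        (List.replicate m.toNat v1 ++ (L.getD (pvEff L.length (b-1-k)).toNat []).drop m.toNat)).length k <
      (L.set (pvEff L.length (b-1-k)).toNat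
        (List.replicate m.toNat v1 ++ (L.getD (pvEff L.length (b-1-k)).toNat []).drop m.toNat)).length := by
    rw [hlen1]; exact h2
  have hrow2 : m.toNat ≤ ((L.set (pvEff L.length (b-1-k)).toNat
      (List.replicate m.toNat v1 ++ (L.getD (pvEff L.length (b-1-k)).toNat []).drop m.toNat)).getD
        (pvEff (L.set (pvEff L.length (b-1-k)).toNat
          (List.replicate m.toNat v1 ++ (L.getD (pvEff L.length (b-1-k)).toNat []).drop m.toNat)).length k).toNat []).length := by
    rw [hlen1]
    by_cases heq : (pvEff L.length (b-1-k)).toNat = (pvEff L.length k).toNat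
    · rw [← heq, getD_set_self' _ _ _ (pvEff_lt _ _ h1)]
      simp
    · rw [getD_set_ne' _ _ _ _ heq]; exact hr2
  rw [phase_fold k v2 _ h2' m.toNat hrow2, pySliceFill_pos _ _ _ _ h2' hm]

-- ---- A's loop: counters follow the divmod decomposition of the piece count ----
-- the single-counter per-cell loop A's state machine is equal to (proof-layer only)
def pvCellLoop (boyut tasSayisi : Int) (o1 o2 : String) :
    Nat → List (List String) → Int → List (List String)
  | 0, liste, _ => liste
  | fuel + 1, liste, j =>
    let liste := pvPerCell boyut o1 o2 liste j
    let j := j + 1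
    if j = tasSayisi then liste else pvCellLoop boyut tasSayisi o1 o2 fuel liste j

-- how Python's divmod evolves when j steps to j+1 (positive divisor, nonnegative j)
lemma divmod_step (b j : Int) (hb : 0 < b) (hj : 0 ≤ j) :
    (j % b + 1 = b → (j + 1) / b = j / b + 1 ∧ (j + 1) % b = 0) ∧
    (j % b + 1 ≠ b → (j + 1) / b = j / b ∧ (j + 1) % b = j % b + 1) := by
  have hbne : b ≠ 0 := by omega
  have hsum : b * (j / b) + j % b = j := Int.ediv_add_emod j b
  have hr0 : 0 ≤ j % b := Int.emod_nonneg j hbne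
  have hrb : j % b < b := Int.emod_lt_of_pos j hb
  constructor
  · intro hreset
    have hj1 : j + 1 = b * (j / b + 1) := by ring_nf; omega
    constructor
    · rw [hj1, Int.mul_ediv_cancel_left _ hbne]
    · rw [hj1, Int.mul_emod_right]
  · intro hne
    have hlt : j % b + 1 < b := by omega
    have hj1 : j + 1 = (j % b + 1) + b * (j / b) := by omega
    constructor
    · rw [hj1, Int.add_mul_ediv_left _ _ hbne,
        Int.ediv_eq_zero_of_lt (by omega) hlt, zero_add]
    · rw [hj1, Int.add_mul_emod_self_left, Int.emod_eq_of_lt (by omega) hlt]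

-- loop invariant (boyut ≥ 1): A's four counters always hold the divmod decomposition of
-- the number j of pieces already placed
lemma loops_eq (boyut tasSayisi : Int) (o1 o2 : String) (hb : 1 ≤ boyut) :
    ∀ (n : Nat) (j : Int) (L : List (List String)), 0 ≤ j →
      TabloDoldurLoop boyut tasSayisi o1 o2 n L (boyut - 1 - j / boyut) (j % boyut) (j / boyut) (j % boyut) j
        = pvCellLoop boyut tasSayisi o1 o2 n L j := by
  intro n
  induction n with
  | zero => intro j L _; rfl
  | succ n ih =>
    intro j L hj
    have hfd : PySem.Int.floordiv j boyut = j / boyut :=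
      PySem.Int.floordiv_eq_ediv_of_pos (by omega : (0:Int) < boyut)
    have hmd : PySem.Int.mod j boyut = j % boyut :=
      PySem.Int.mod_eq_emod_of_pos (by omega : (0:Int) < boyut)
    have hdm := divmod_step boyut j (by omega) hj
    by_cases hT : j + 1 = tasSayisi
    · simp only [TabloDoldurLoop, pvCellLoop, pvPerCell, hfd, hmd, if_pos hT]
    · by_cases hr : j % boyut + 1 = boyut
      · obtain ⟨hq, hm⟩ := hdm.1 hr
        simp only [TabloDoldurLoop, pvCellLoop, pvPerCell, hfd, hmd, if_neg hT, if_pos hr]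
        have := ih (j + 1)
          (pySetCell (pySetCell L (boyut - 1 - j / boyut) (j % boyut) o1) (j / boyut) (j % boyut) o2)
          (by omega)
        rw [hq, hm] at this
        convert this using 2 <;> ring
      · obtain ⟨hq, hm⟩ := hdm.2 hr
        simp only [TabloDoldurLoop, pvCellLoop, pvPerCell, hfd, hmd, if_neg hT, if_neg hr]
        have := ih (j + 1)
          (pySetCell (pySetCell L (boyut - 1 - j / boyut) (j % boyut) o1) (j / boyut) (j % boyut) o2)
          (by omega)
        rw [hq, hm] at this
        exact this

-- the fueled per-cell loop is a flat fold over range(j, tasSayisi)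
lemma cellRun (b t : Int) (o1 o2 : String) :
    ∀ (n : Nat) (j : Int) (L : List (List String)), j + n = t → j < t →
      pvCellLoop b t o1 o2 n L j = (PySem.List.pyRange j t 1).foldl (pvPerCell b o1 o2) L := by
  intro n
  induction n with
  | zero => intro j L hn hlt; omega
  | succ n ih =>
    intro j L hn hlt
    rw [PySem.List.pyRange_one_cons hlt, List.foldl_cons]
    simp only [pvCellLoop]
    by_cases hT : j + 1 = t
    · rw [if_pos hT, hT, PySem.List.pyRange_one_eq_nil (le_refl t), List.foldl_nil]
    · rw [if_neg hT]
      exact ih (j+1) _ (by omega) (by omega)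

-- ---- reading Pre_'s per-cell checks ----
lemma pvCellOk_row (liste : List (List String)) (i j : Int) (h : pvCellOk liste i j = true) :
    0 ≤ pvEff liste.length i ∧ pvEff liste.length i < liste.length := by
  unfold pvCellOk at h
  simp only [Bool.and_eq_true, decide_eq_true_eq] at h
  obtain ⟨⟨⟨h1, h2⟩, _⟩, _⟩ := h
  unfold pvEff
  split_ifs <;> omega

lemma pvCellOk_col (liste : List (List String)) (i j : Int) (h : pvCellOk liste i j = true)
    (hj : 0 ≤ j) : j.toNat < (liste.getD (pvEff liste.length i).toNat []).length := by
  unfold pvCellOk at h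
  simp only [Bool.and_eq_true, decide_eq_true_eq] at h
  obtain ⟨⟨_, _⟩, h4⟩ := h
  have : pvRowLen liste i = (liste.getD (pvEff liste.length i).toNat []).length := rfl
  omega

-- all four conditions blockEq needs at block k, transported to a same-shape state L
lemma blockConds (b t : Int) (hb : 0 < b) (liste L : List (List String))
    (hshape : L.map List.length = liste.map List.length)
    (hcell : ∀ j : Int, 0 ≤ j → j < t →
      (pvCellOk liste (b-1-j/b) (j%b) && pvCellOk liste (j/b) (j%b)) = true)
    (k m : Int) (hk : 0 ≤ k) (hm : 0 < m) (hmb : m ≤ b) (hblock : k*b + m ≤ t) :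
    ((0 ≤ pvEff L.length (b-1-k) ∧ pvEff L.length (b-1-k) < L.length) ∧
     (0 ≤ pvEff L.length k ∧ pvEff L.length k < L.length)) ∧
    m.toNat ≤ (L.getD (pvEff L.length (b-1-k)).toNat []).length ∧
    m.toNat ≤ (L.getD (pvEff L.length k).toNat []).length := by
  have hL : L.length = liste.length := shape_length _ _ hshape
  have hrl := shape_rowlen _ _ hshape
  have hkb : 0 ≤ k*b := mul_nonneg hk (le_of_lt hb)
  have h := hcell (k*b + (m-1)) (by omega) (by omega)
  obtain ⟨hdiv, hmod⟩ := blockDivMod b k (m-1) hb (by omega) (by omega)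
  rw [hdiv, hmod] at h
  simp only [Bool.and_eq_true] at h
  obtain ⟨hc1, hc2⟩ := h
  have hrow1 := pvCellOk_row _ _ _ hc1
  have hrow2 := pvCellOk_row _ _ _ hc2
  have hcol1 := pvCellOk_col _ _ _ hc1 (by omega)
  have hcol2 := pvCellOk_col _ _ _ hc2 (by omega)
  rw [hL]
  exact ⟨⟨hrow1, hrow2⟩, by rw [hrl]; omega, by rw [hrl]; omega⟩

-- ---- the first n full row-blocks ----
lemma fullRows (b t : Int) (hb : 0 < b) (o1 o2 : String) (liste : List (List String))
    (hcell : ∀ j : Int, 0 ≤ j → j < t →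
      (pvCellOk liste (b-1-j/b) (j%b) && pvCellOk liste (j/b) (j%b)) = true) :
    ∀ (n : Nat), (n:Int)*b ≤ t →
      (PySem.List.pyRange 0 ((n:Int)*b) 1).foldl (pvPerCell b o1 o2) liste
        = (PySem.List.pyRange 0 (n:Int) 1).foldl
            (fun L k => pySliceFill (pySliceFill L (b-1-k) b o1) k b o2) liste := by
  intro n
  induction n with
  | zero =>
    intro _
    rw [Nat.cast_zero, zero_mul, PySem.List.pyRange_one_eq_nil (le_refl 0)]
    rfl
  | succ n ih =>
    intro hle
    have hcast : (((n+1:Nat)):Int)*b = (n:Int)*b + b := by push_cast; ring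
    have hkb : 0 ≤ (n:Int)*b := mul_nonneg (by positivity) (le_of_lt hb)
    have hnb : (n:Int)*b ≤ t := by omega
    rw [hcast,
        PySem.List.pyRange_one_append 0 ((n:Int)*b) ((n:Int)*b + b) hkb (by omega),
        List.foldl_append, ih hnb,
        show ((n+1:Nat):Int) = (n:Int)+1 by push_cast; ring,
        PySem.List.pyRange_one_succ_right (by positivity : (0:Int) ≤ (n:Int)),
        List.foldl_append, List.foldl_cons, List.foldl_nil]
    have hshape : ((PySem.List.pyRange 0 ((n:Int)) 1).foldl
          (fun L k => pySliceFill (pySliceFill L (b-1-k) b o1) k b o2) liste).map List.length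
        = liste.map List.length := by
      rw [← ih hnb]; exact shape_foldl_pvPerCell b hb o1 o2 _ liste
    obtain ⟨⟨h1, h2⟩, hr1, hr2⟩ :=
      blockConds b t hb liste _ hshape hcell (n:Int) b (by positivity) hb (le_refl b) (by omega)
    exact blockEq b hb o1 o2 (n:Int) b (by positivity) (le_of_lt hb) (le_refl b) _ h1 h2 hr1 hr2

-- B's fueled while loop is a flat fold over range(dolu)
lemma altLoopRun (b dolu : Int) (o1 o2 : String) :
    ∀ (n : Nat) (satir : Int) (L : List (List String)), satir + n = dolu →
      TabloDoldurAltLoop b dolu o1 o2 (n + 1) L satir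
        = (PySem.List.pyRange satir dolu 1).foldl
            (fun M k => pySliceFill (pySliceFill M (b-1-k) b o1) k b o2) L := by
  intro n
  induction n with
  | zero =>
    intro satir L hn
    simp only [TabloDoldurAltLoop, if_pos (by omega : satir = dolu)]
    rw [PySem.List.pyRange_one_eq_nil (by omega)]
    rfl
  | succ n ih =>
    intro satir L hn
    have hlt : satir < dolu := by omega
    simp only [TabloDoldurAltLoop, if_neg (by omega : ¬ satir = dolu)]
    rw [PySem.List.pyRange_one_cons hlt, List.foldl_cons]
    exact ih (satir + 1) _ (by omega)

-- ===== VERDICT (by name: the statement is the Claim_ definition above) =====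
theorem TabloDoldur_spec : Claim_equal_TabloDoldur := by
  intro liste b t o1 o2 _ hpre
  unfold Spec_TabloDoldur
  unfold Pre_TabloDoldur at hpre
  simp only [Bool.and_eq_true, decide_eq_true_eq] at hpre
  obtain ⟨⟨⟨hb1, ht1⟩, -⟩, hall⟩ := hpre
  have hb0 : (0:Int) < b := by omega
  have hcell : ∀ j : Int, 0 ≤ j → j < t →
      (pvCellOk liste (b-1-j/b) (j%b) && pvCellOk liste (j/b) (j%b)) = true := by
    intro j h0 hlt
    exact List.all_eq_true.mp hall _ (PySem.List.mem_pyRange_one.mpr ⟨h0, hlt⟩)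
  have hA : TabloDoldur liste b t o1 o2 = (PySem.List.pyRange 0 t 1).foldl (pvPerCell b o1 o2) liste := by
    unfold TabloDoldur
    have h0 := loops_eq b t o1 o2 hb1 t.toNat 0 liste le_rfl
    rw [Int.zero_ediv, Int.zero_emod, sub_zero] at h0
    rw [h0]
    exact cellRun b t o1 o2 t.toNat 0 liste (by omega) (by omega)
  rw [hA]
  simp only [TabloDoldur_alt]
  rw [PySem.Int.floordiv_eq_ediv_of_pos hb0, PySem.Int.mod_eq_emod_of_pos hb0]
  have hsum : b * (t / b) + t % b = t := Int.ediv_add_emod t b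
  set q := t / b with hqdef
  set r := t % b with hrdef
  have hq0 : 0 ≤ q := Int.ediv_nonneg (by omega) (by omega)
  have hr0 : 0 ≤ r := Int.emod_nonneg t (by omega)
  have hrb : r < b := Int.emod_lt_of_pos t hb0
  have hcomm : q * b = b * q := mul_comm q b
  have hqb : q * b ≤ t := by omega
  have hq0b : 0 ≤ q * b := mul_nonneg hq0 (le_of_lt hb0)
  have hcast : ((q.toNat) : Int) = q := Int.toNat_of_nonneg hq0
  have hfull := fullRows b t hb0 o1 o2 liste hcell q.toNat (by rw [hcast]; exact hqb)
  rw [hcast] at hfull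
  have hloop := altLoopRun b q o1 o2 q.toNat 0 liste (by omega)
  rw [hloop]
  by_cases hrz : r = 0
  · rw [if_neg (by omega)]
    rw [show t = q * b by omega]
    exact hfull
  · rw [if_pos (by omega)]
    rw [show t = q * b + r by omega]
    rw [PySem.List.pyRange_one_append 0 (q * b) (q * b + r) hq0b (by omega),
        List.foldl_append, hfull]
    have hshape : ((PySem.List.pyRange 0 q 1).foldl
          (fun L k => pySliceFill (pySliceFill L (b-1-k) b o1) k b o2) liste).map List.length
        = liste.map List.length := by
      rw [← hfull]; exact shape_foldl_pvPerCell b hb0 o1 o2 _ liste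
    obtain ⟨⟨h1, h2⟩, hr1, hr2⟩ :=
      blockConds b t hb0 liste _ hshape hcell q r hq0 (by omega) (le_of_lt hrb) (by omega)
    exact blockEq b hb0 o1 o2 q r hq0 hr0 (le_of_lt hrb) _ h1 h2 hr1 hr2
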